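-- pv_equiv track=rewrite | github.com/sandialabs/linkshop | linkograph/enumeration.py | enumOnt
-- ===== SOURCE A (Python) =====
-- def enumOnt(enum, absClasses=None):
--     """ Take an enumeration of labeled onotlogies and returns the ontology.
--
--     A list, enum, of the form [a0, ..., a(n-1)] corresponds to the
--     labeled graph which has labels '0', '1', ..., 'n-1' and edges that
--     are encoded in the following way: writing the integer ai in binary
--     ai = 'bk...b3b2b1' indicates there is an edge between 'i' and 'j'
--     if and only if bj is 1.
--
--     The absClasses option allows the user to specify the abstraction
--     classes. Only the first length of enum classes are used. It is an
--     error to have fewer abstraction classes.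
--
--     """
--
--     if absClasses is None:
--         absClasses = list(range(len(enum)))
--     else:
--         absClasses = absClasses[:len(enum)]
--
--     # Make the ontology classes.
--     ont = {str(aClass): [] for aClass in absClasses}
--
--     for abs, i in zip(absClasses, enum):
--
--         index = 0
--
--         while i > 0:
--
--             currentAbs = absClasses[index]
--
--             # Test for bit.
--             if i & 1 == 1:
--                 # Add in the edge
--                 ont[str(abs)].append(str(currentAbs))
--
--             # Shift off the bit
--             i >>= 1
--
--             #increment the index.
--             index += 1
--
--
--     return ont
-- ===== SOURCE B (Python) =====
-- def enumOnt(enum, absClasses=None):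
--     n = len(enum)
--     acs = list(range(n)) if absClasses is None else absClasses[:n]
--     labels = [str(c) for c in acs]
--     rows = list(zip(labels, enum))
--
--     # Transposed traversal: fill a per-row edge matrix column by column (outer loop
--     # over bit positions, inner over the nodes), then merge it into the dict row-major.
--     edges = [[] for _ in rows]
--     width = max((i.bit_length() for _, i in rows if i > 0), default=0)
--     for j in range(width):
--         colLabel = labels[j]
--         edges = [e + [colLabel] if i > 0 and (i >> j) & 1 else e
--                  for (lab, i), e in zip(rows, edges)]
--
--     ont = {lab: [] for lab in labels}
--     for (lab, _), e in zip(rows, edges):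
--         ont[lab].extend(e)
--     return ont
-- ===== Notes on version B (the rewrite author's own statement) =====
-- stated objective: alternative
-- what changed: B transposes the traversal: it fills a per-row edge matrix column by column (outer loop over bit positions up to the maximum bit_length, inner loop over the nodes) and then merges the matrix into the ontology dict in one final pass, instead of A's per-node shift-and-index while loop that appends straight into the dict.
import Mathlib
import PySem

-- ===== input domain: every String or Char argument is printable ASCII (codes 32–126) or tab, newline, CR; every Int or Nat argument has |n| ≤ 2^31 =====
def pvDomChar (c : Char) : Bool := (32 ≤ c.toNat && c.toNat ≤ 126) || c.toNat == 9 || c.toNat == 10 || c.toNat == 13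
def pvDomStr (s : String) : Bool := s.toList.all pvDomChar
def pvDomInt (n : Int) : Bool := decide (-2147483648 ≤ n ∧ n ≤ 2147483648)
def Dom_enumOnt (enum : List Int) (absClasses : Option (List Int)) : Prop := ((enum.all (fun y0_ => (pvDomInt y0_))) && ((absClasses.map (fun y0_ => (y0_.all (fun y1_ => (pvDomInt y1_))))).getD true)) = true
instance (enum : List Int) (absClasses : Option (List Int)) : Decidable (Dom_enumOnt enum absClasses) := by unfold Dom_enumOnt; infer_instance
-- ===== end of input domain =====

-- B transposes the traversal: it fills a per-row edge matrix column by column (outer loop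
-- over bit positions, inner over the nodes) and merges it into the dict at the end, instead
-- of A's per-node shift-and-index while loop (objective: alternative).

-- ===== PORT A =====
-- A's inner `while i > 0` loop: walks the bits of i, appending labels into ont[key].
-- Where Python raises IndexError (absClasses[index] out of range; excluded by Pre_) the
-- port returns the dict as is.
def enumOntWhileA (acs : List Int) (key : String) (index : Nat) (i : Int)
    (ont : PySem.Dict String (List String)) : PySem.Dict String (List String) :=
  if 0 < i then
    match PySem.List.pyGet? acs (index : Int) with
    | none => ont  -- Python raises IndexError here; outside Pre_enumOnt
    | some currentAbs =>
        let ont' := if PySem.Int.band i 1 = 1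
          then ont.modify key [] (fun v => v ++ [PySem.Int.toStr currentAbs])
          else ont
        enumOntWhileA acs key (index + 1) (i >>> (1 : Nat)) ont'
  else ont
termination_by i.toNat
decreasing_by
  have := Int.shiftRight_eq_div_pow i 1
  omega

def enumOnt (enum : List Int) (absClasses : Option (List Int)) : List (String × List String) :=
  let acs : List Int := match absClasses with
    | none => PySem.List.pyRange 0 (enum.length : Int) 1
    | some l => PySem.List.slice l none (some (enum.length : Int))
  let ont0 := acs.foldl (fun d aClass => d.insert (PySem.Int.toStr aClass) ([] : List String))
    PySem.Dict.empty
  let ont := (acs.zip enum).foldl (fun d p => enumOntWhileA acs (PySem.Int.toStr p.1) 0 p.2 d) ont0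
  ont.items

-- ===== PORT B =====
def enumOnt_alt (enum : List Int) (absClasses : Option (List Int)) : List (String × List String) :=
  let n := enum.length
  let acs : List Int := match absClasses with
    | none => PySem.List.pyRange 0 (n : Int) 1
    | some l => PySem.List.slice l none (some (n : Int))
  let labels := acs.map PySem.Int.toStr
  let rows := labels.zip enum
  let edges0 : List (List String) := rows.map (fun _ => ([] : List String))
  -- width = max((i.bit_length() for _, i in rows if i > 0), default=0)
  let width : Nat := PySem.List.maxD
    (rows.filterMap (fun p => if 0 < p.2 then some (PySem.Int.bitLength p.2) else none))
    (fun x => x) 0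
  -- column-major fill of the per-row edge matrix; colLabel = labels[j] is in range under
  -- Pre_enumOnt (pyGetD is its total form; outside Pre_ Python raises IndexError there)
  let edges := (PySem.List.pyRange 0 (width : Int) 1).foldl (fun es j =>
      (rows.zip es).map (fun pe =>
        if 0 < pe.1.2 ∧ PySem.Int.band (pe.1.2 >>> j.toNat) 1 = 1
        then pe.2 ++ [PySem.List.pyGetD labels j ""] else pe.2)) edges0
  let ont0 := labels.foldl (fun d lab => d.insert lab ([] : List String)) PySem.Dict.empty
  let ont := (rows.zip edges).foldl (fun d pe =>
      d.modify pe.1.1 [] (fun v => v ++ pe.2)) ont0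
  ont.items

-- ===== PRECONDITION & SPEC =====
-- Pre_ excludes exactly the inputs where a zipped enum entry has more binary digits than there
-- are abstraction classes: there both A and B raise IndexError (absClasses[index] / labels[j]).
def Pre_enumOnt (enum : List Int) (absClasses : Option (List Int)) : Prop :=
  let acs : List Int := match absClasses with
    | none => PySem.List.pyRange 0 (enum.length : Int) 1
    | some l => l.take enum.length
  ∀ i ∈ enum.take acs.length, i < 2 ^ acs.length
instance (enum : List Int) (absClasses : Option (List Int)) : Decidable (Pre_enumOnt enum absClasses) := by unfold Pre_enumOnt; infer_instance

def pvWitness_enumOnt : List Int × Option (List Int) := ([3, 1, 0], none)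

def Spec_enumOnt (enum : List Int) (absClasses : Option (List Int)) (out : List (String × List String)) : Prop := out = enumOnt_alt enum absClasses
instance (enum : List Int) (absClasses : Option (List Int)) (out : List (String × List String)) : Decidable (Spec_enumOnt enum absClasses out) := by unfold Spec_enumOnt; infer_instance

-- ===== CLAIM (what is proved, stated in full; the proofs are below) =====
def Claim_equal_enumOnt : Prop := ∀ (enum : List Int) (absClasses : Option (List Int)), Dom_enumOnt enum absClasses → Pre_enumOnt enum absClasses → Spec_enumOnt enum absClasses (enumOnt enum absClasses)

-- ===== LEMMAS AND PROOFS =====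

-- The list of labels A's while loop appends for the bits of i, starting at bit position index.
def pvBitsA (labels : List String) (index : Nat) (i : Int) : List String :=
  if 0 < i then
    (if PySem.Int.band i 1 = 1 then [labels.getD index ""] else [])
      ++ pvBitsA labels (index + 1) (i >>> (1 : Nat))
  else []
termination_by i.toNat
decreasing_by
  have := Int.shiftRight_eq_div_pow i 1
  omega

lemma pv_shiftInt (a : Int) (k : Nat) : a >>> ((k : Int)) = a >>> k := by
  cases a <;> cases k <;> rfl

lemma pv_shift1 (i : Int) : i >>> (1 : Nat) = PySem.Int.floordiv i 2 := by
  rw [Int.shiftRight_eq_div_pow, PySem.Int.floordiv_eq_ediv_of_pos (by norm_num)]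
  norm_num

lemma pv_bitLength_le {i : Int} {m : Nat} (h0 : 0 < i) (h : i < 2 ^ m) :
    PySem.Int.bitLength i ≤ m := by
  by_contra hc
  have h1 := PySem.Int.two_pow_bitLength_le i (by omega)
  have h2 : 2 ^ m ≤ 2 ^ (PySem.Int.bitLength i - 1) :=
    Nat.pow_le_pow_right (by norm_num) (by omega)
  have h3 : (2 ^ m : Nat) ≤ i.natAbs := le_trans h2 h1
  have hcast : ((2 ^ m : Nat) : Int) = 2 ^ m := by push_cast; ring
  omega

-- A's while loop is one insert at key of all the appended labels.
lemma pv_whileA_eq (acs : List Int) (key : String) (i : Int) (index : Nat)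
    (d : PySem.Dict String (List String))
    (h0 : 0 < i) (hb : PySem.Int.bitLength i + index ≤ acs.length) :
    enumOntWhileA acs key index i d
      = d.insert key (d.getD key [] ++ pvBitsA (acs.map PySem.Int.toStr) index i) := by
  have H : ∀ n (i : Int), i.toNat ≤ n → ∀ index (d : PySem.Dict String (List String)),
      0 < i → PySem.Int.bitLength i + index ≤ acs.length →
      enumOntWhileA acs key index i d
        = d.insert key (d.getD key [] ++ pvBitsA (acs.map PySem.Int.toStr) index i) := by
    intro n
    induction n with
    | zero => intro i hn index d h0 _; omega
    | succ n ih =>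
      intro i hn index d h0 hb
      have hbl := PySem.Int.bitLength_of_pos h0
      have hsh := pv_shift1 i
      have hdiv := Int.shiftRight_eq_div_pow i 1
      norm_num at hdiv
      have hidx : index < acs.length := by omega
      have hlab : (acs.map PySem.Int.toStr).getD index "" = PySem.Int.toStr acs[index] := by
        rw [List.getD_eq_getElem _ _ (by simpa using hidx), List.getElem_map]
      rw [enumOntWhileA]
      simp only [if_pos h0, PySem.List.pyGet?_natCast, List.getElem?_eq_getElem hidx]
      rw [pvBitsA, if_pos h0]
      simp only [PySem.Dict.modify]
      have hmod := PySem.Int.band_one i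
      have hfm := PySem.Int.floordiv_mul_add_mod i 2
      have hm2 := PySem.Int.mod_two_eq i
      by_cases hbit : PySem.Int.band i 1 = 1
      · simp only [if_pos hbit]
        by_cases h0' : 0 < i >>> (1 : Nat)
        · have hbl' : PySem.Int.bitLength (i >>> (1 : Nat)) + (index + 1) ≤ acs.length := by
            rw [hsh]; omega
          rw [ih (i >>> (1 : Nat)) (by omega) (index + 1) _ h0' hbl',
            PySem.Dict.getD_insert_self, PySem.Dict.insert_insert_self, hlab]
          simp
        · have hz : i >>> (1 : Nat) = 0 := by omega
          rw [enumOntWhileA, if_neg (by omega), pvBitsA, if_neg (by omega), hlab]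
          simp
      · simp only [if_neg hbit]
        have h0' : 0 < i >>> (1 : Nat) := by omega
        have hbl' : PySem.Int.bitLength (i >>> (1 : Nat)) + (index + 1) ≤ acs.length := by
          rw [hsh]; omega
        rw [ih (i >>> (1 : Nat)) (by omega) (index + 1) _ h0' hbl']
        simp
  exact H i.toNat i le_rfl index d h0 hb

-- A's appended labels are exactly a filterMap over range(bit_length).
lemma pv_bits_eq (labels : List String) (i : Int) (index : Nat) (h0 : 0 ≤ i) :
    pvBitsA labels index i
      = (PySem.List.pyRange 0 (PySem.Int.bitLength i : Int) 1).filterMap (fun j =>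
          if PySem.Int.band (i >>> j.toNat) 1 = 1
          then some (PySem.List.pyGetD labels (j + (index : Int)) "") else none) := by
  have H : ∀ n (i : Int), i.toNat ≤ n → 0 ≤ i → ∀ index : Nat,
      pvBitsA labels index i
        = (PySem.List.pyRange 0 (PySem.Int.bitLength i : Int) 1).filterMap (fun j =>
            if PySem.Int.band (i >>> j.toNat) 1 = 1
            then some (PySem.List.pyGetD labels (j + (index : Int)) "") else none) := by
    intro n
    induction n with
    | zero =>
      intro i hn h0 index
      have hz : i = 0 := by omega
      subst hz
      rw [pvBitsA, if_neg (by omega)]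
      norm_num [PySem.Int.bitLength_zero, PySem.List.pyRange_one_eq_nil]
    | succ n ih =>
      intro i hn h0 index
      by_cases hpos : 0 < i
      · have hbl := PySem.Int.bitLength_of_pos hpos
        have hsh := pv_shift1 i
        have hdiv := Int.shiftRight_eq_div_pow i 1
        norm_num at hdiv
        rw [pvBitsA, if_pos hpos, ih (i >>> (1 : Nat)) (by omega) (by omega) (index + 1)]
        rw [← hsh] at hbl
        rw [hbl]
        simp only [PySem.List.pyRange_zero_natCast, List.filterMap_map, List.range_succ_eq_map,
          List.filterMap_cons, Function.comp, Int.toNat_natCast, pv_shiftInt]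
        have htail : List.filterMap
              (fun (x : Nat) => if PySem.Int.band (i >>> Nat.succ x) 1 = 1
                then some (PySem.List.pyGetD labels (↑(Nat.succ x) + (index : Int)) "") else none)
              (List.range (PySem.Int.bitLength (i >>> (1 : Nat))))
            = List.filterMap
              (fun (x : Nat) => if PySem.Int.band (i >>> (1 : Nat) >>> x) 1 = 1
                then some (PySem.List.pyGetD labels (↑x + ((index + 1 : Nat) : Int)) "") else none)
              (List.range (PySem.Int.bitLength (i >>> (1 : Nat)))) := by
          apply List.filterMap_congr
          intro x _
          have h1 : i >>> Nat.succ x = i >>> (1 : Nat) >>> x := by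
            rw [← Int.shiftRight_add]; congr 1; omega
          have h2 : ((Nat.succ x : Nat) : Int) + (index : Int)
              = ((x : Nat) : Int) + ((index + 1 : Nat) : Int) := by push_cast; ring
          rw [h1, h2]
        rw [htail]
        by_cases hbit : PySem.Int.band i 1 = 1
        · simp [hbit, PySem.List.pyGetD_natCast]
        · simp [hbit]
      · have hz : i = 0 := by omega
        subst hz
        rw [pvBitsA, if_neg (by omega)]
        norm_num [PySem.Int.bitLength_zero, PySem.List.pyRange_one_eq_nil]
  exact H i.toNat i le_rfl h0 index

-- A's whole row loop as a fold of per-row conditional appends over the labelled rows.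
lemma pv_fold_eq (acs enum : List Int)
    (hpre : ∀ p ∈ acs.zip enum, p.2 < 2 ^ acs.length)
    (d : PySem.Dict String (List String)) :
    (acs.zip enum).foldl (fun d p => enumOntWhileA acs (PySem.Int.toStr p.1) 0 p.2 d) d
    = ((acs.map PySem.Int.toStr).zip enum).foldl (fun d p =>
        if 0 < p.2 then
          d.modify p.1 [] (fun v => v ++
            (PySem.List.pyRange 0 (PySem.Int.bitLength p.2 : Int) 1).filterMap (fun j =>
              if PySem.Int.band (p.2 >>> j.toNat) 1 = 1
              then some (PySem.List.pyGetD (acs.map PySem.Int.toStr) j "") else none))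
        else d) d := by
  rw [List.zip_map_left, List.foldl_map]
  simp only [Prod.map_fst, Prod.map_snd, id_eq]
  have H : ∀ (ps : List (Int × Int)), (∀ p ∈ ps, p.2 < 2 ^ acs.length) →
      ∀ d : PySem.Dict String (List String),
      ps.foldl (fun d p => enumOntWhileA acs (PySem.Int.toStr p.1) 0 p.2 d) d
      = ps.foldl (fun d p =>
          if 0 < p.2 then
            (PySem.Dict.modify d (PySem.Int.toStr p.1) [] (fun v => v ++
              (PySem.List.pyRange 0 (PySem.Int.bitLength p.2 : Int) 1).filterMap (fun j =>
                if PySem.Int.band (p.2 >>> j.toNat) 1 = 1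
                then some (PySem.List.pyGetD (acs.map PySem.Int.toStr) j "") else none)))
          else d) d := by
    intro ps
    induction ps with
    | nil => intro _ d; rfl
    | cons a ps ih =>
      intro hp d
      simp only [List.foldl_cons]
      have ha := hp a (by simp)
      by_cases h0 : 0 < a.2
      · rw [pv_whileA_eq acs _ a.2 0 d h0 (by
          have := pv_bitLength_le h0 ha; omega)]
        rw [if_pos h0]
        have hbits := pv_bits_eq (acs.map PySem.Int.toStr) a.2 0 (le_of_lt h0)
        simp only [Nat.cast_zero, add_zero, pv_shiftInt] at hbits
        rw [hbits, PySem.Dict.modify]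
        exact ih (fun p hmem => hp p (by simp [hmem])) _
      · rw [enumOntWhileA, if_neg h0, if_neg h0]
        exact ih (fun p hmem => hp p (by simp [hmem])) _
  simp only [pv_shiftInt]
  exact H _ hpre d

-- getD through one conditional append-modify pass (A's row loop).
lemma pv_getD_condfold {β : Type} (c : String × β → Prop) [DecidablePred c]
    (g : String × β → List String) (ps : List (String × β)) :
    ∀ (d : PySem.Dict String (List String)) (x : String),
    (ps.foldl (fun d p => if c p then d.modify p.1 [] (fun v => v ++ g p) else d) d).getD x []
      = d.getD x [] ++ (ps.filter (fun p => decide (p.1 = x) && decide (c p))).flatMap g := by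
  induction ps with
  | nil => intro d x; simp
  | cons p ps ih =>
    intro d x
    simp only [List.foldl_cons, List.filter_cons]
    by_cases hc : c p
    · rw [if_pos hc, ih]
      rw [PySem.Dict.getD_modify]
      by_cases hx : x = p.1
      · subst hx
        simp [hc]
      · simp [hc, hx, Ne.symm hx]
    · rw [if_neg hc, ih]
      simp [hc]

-- keys are unchanged by a conditional modify pass over keys already present.
lemma pv_keys_condfold {β : Type} (c : String × β → Prop) [DecidablePred c]
    (g : String × β → List String → List String) (ps : List (String × β)) :
    ∀ (d : PySem.Dict String (List String)), (∀ p ∈ ps, p.1 ∈ d.keys) →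
    (ps.foldl (fun d p => if c p then d.modify p.1 [] (g p) else d) d).keys = d.keys := by
  induction ps with
  | nil => intro d _; rfl
  | cons p ps ih =>
    intro d hmem
    simp only [List.foldl_cons]
    by_cases hc : c p
    · rw [if_pos hc]
      have hk : (d.modify p.1 [] (g p)).keys = d.keys := by
        rw [PySem.Dict.keys_modify, PySem.Dict.keys_insert_of_contains]
        exact (PySem.Dict.contains_iff_mem_keys d p.1).mpr (hmem p (by simp))
      rw [ih _ (by rw [hk]; exact fun q hq => hmem q (by simp [hq])), hk]
    · rw [if_neg hc]
      exact ih _ (fun q hq => hmem q (by simp [hq]))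

-- getD through B's unconditional extend-merge pass.
lemma pv_getD_extfold {β : Type} (key : β → String) (g : β → List String) (ps : List β) :
    ∀ (d : PySem.Dict String (List String)) (x : String),
    (ps.foldl (fun d pe => d.modify (key pe) [] (fun v => v ++ g pe)) d).getD x []
      = d.getD x [] ++ (ps.filter (fun pe => decide (key pe = x))).flatMap g := by
  induction ps with
  | nil => intro d x; simp
  | cons p ps ih =>
    intro d x
    simp only [List.foldl_cons, List.filter_cons]
    rw [ih, PySem.Dict.getD_modify]
    by_cases hx : x = key p
    · subst hx
      simp
    · simp [hx, Ne.symm hx]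

-- filterMap of an if-some is a flatMap of an if-singleton.
lemma pv_filterMap_flatMap {α β : Type} (P : α → Prop) [DecidablePred P] (e : α → β)
    (l : List α) :
    l.filterMap (fun a => if P a then some (e a) else none)
      = l.flatMap (fun a => if P a then [e a] else []) := by
  induction l with
  | nil => rfl
  | cons a l ih =>
    by_cases h : P a <;> simp [h, ih]

-- a positive int shifted past its bit length is zero.
lemma pv_shift_high {i : Int} {j : Nat} (h0 : 0 < i) (hj : PySem.Int.bitLength i ≤ j) :
    i >>> j = 0 := by
  have h1 := PySem.Int.lt_two_pow_bitLength i
  have h2 : 2 ^ PySem.Int.bitLength i ≤ 2 ^ j := Nat.pow_le_pow_right (by norm_num) hj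
  rw [Int.shiftRight_eq_div_pow]
  have hlt : i < 2 ^ j := by
    have : (i.natAbs : Int) = i := Int.natAbs_of_nonneg (by omega)
    have hc : ((2 ^ j : Nat) : Int) = 2 ^ j := by push_cast; ring
    omega
  exact Int.ediv_eq_zero_of_lt (by omega) hlt

-- updating a set with elements it already has changes nothing.
lemma pv_update_of_subset (s : PySem.Set String) (xs : List String)
    (h : ∀ x ∈ xs, x ∈ s) : s.update xs = s := by
  induction xs generalizing s with
  | nil => rfl
  | cons x xs ih =>
    rw [PySem.Set.update.eq_1, List.foldl_cons, ← PySem.Set.update.eq_1,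
      PySem.Set.add_of_mem (h x (by simp))]
    exact ih s (fun y hy => h y (by simp [hy]))

-- a dict built by inserting only [] answers [] everywhere.
lemma pv_getD_nil (ls : List String) :
    ∀ (d : PySem.Dict String (List String)), (∀ x, d.getD x [] = []) →
    ∀ x, (ls.foldl (fun d l => d.insert l ([] : List String)) d).getD x [] = [] := by
  induction ls with
  | nil => intro d h x; exact h x
  | cons l ls ih =>
    intro d h x
    refine ih _ (fun y => ?_) x
    rw [PySem.Dict.getD_insert]
    split_ifs with hy
    · rfl
    · exact h y

-- zipping a list with a mapped copy of itself.
lemma pv_zip_map_self {α β : Type} (l : List α) (f : α → β) :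
    l.zip (l.map f) = l.map (fun a => (a, f a)) := by
  induction l with
  | nil => rfl
  | cons a l ih => simp [ih]

-- pushing a postponed condition into the filter.
lemma pv_filter_fuse {α : Type} (q c : α → Prop) [DecidablePred q] [DecidablePred c]
    (g : α → List String) (l : List α) :
    (l.filter (fun a => decide (q a) && decide (c a))).flatMap g
      = (l.filter (fun a => decide (q a))).flatMap (fun a => if c a then g a else []) := by
  induction l with
  | nil => rfl
  | cons a l ih =>
    simp only [List.filter_cons]
    by_cases hq : q a <;> by_cases hc : c a <;> simp [hq, hc, ih]

-- B's column loop: each pass extends every row's slot by its own bit of the column.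
lemma pv_col_edges (rows : List (String × Int)) (labels : List String) (js : List Int) :
    ∀ (f : String × Int → List String),
    js.foldl (fun es j =>
        (rows.zip es).map (fun pe =>
          if 0 < pe.1.2 ∧ PySem.Int.band (pe.1.2 >>> j.toNat) 1 = 1
          then pe.2 ++ [PySem.List.pyGetD labels j ""] else pe.2))
      (rows.map f)
      = rows.map (fun p => f p ++ js.flatMap (fun j =>
          if 0 < p.2 ∧ PySem.Int.band (p.2 >>> j.toNat) 1 = 1
          then [PySem.List.pyGetD labels j ""] else [])) := by
  induction js with
  | nil => intro f; simp
  | cons j js ih =>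
    intro f
    simp only [List.foldl_cons]
    rw [pv_zip_map_self, List.map_map]
    have hstep : ((fun pe : (String × Int) × List String =>
          if 0 < pe.1.2 ∧ PySem.Int.band (pe.1.2 >>> j.toNat) 1 = 1
          then pe.2 ++ [PySem.List.pyGetD labels j ""] else pe.2) ∘ (fun a => (a, f a)))
        = fun p : String × Int => if 0 < p.2 ∧ PySem.Int.band (p.2 >>> j.toNat) 1 = 1
          then f p ++ [PySem.List.pyGetD labels j ""] else f p := rfl
    rw [hstep]
    rw [show (fun p : String × Int =>
          if 0 < p.2 ∧ PySem.Int.band (p.2 >>> j.toNat) 1 = 1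
          then f p ++ [PySem.List.pyGetD labels j ""] else f p)
        = (fun p : String × Int => f p ++
          (if 0 < p.2 ∧ PySem.Int.band (p.2 >>> j.toNat) 1 = 1
            then [PySem.List.pyGetD labels j ""] else [])) from by
      funext p; split_ifs <;> simp]
    rw [show rows.map (fun p : String × Int => f p ++
          (if 0 < p.2 ∧ PySem.Int.band (p.2 >>> j.toNat) 1 = 1
            then [PySem.List.pyGetD labels j ""] else []))
        = rows.map (fun a => (fun p : String × Int => f p ++
          (if 0 < p.2 ∧ PySem.Int.band (p.2 >>> j.toNat) 1 = 1
            then [PySem.List.pyGetD labels j ""] else [])) a) from rfl]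
    rw [ih]
    apply List.map_congr_left
    intro p _
    simp only [List.flatMap_cons, pv_shiftInt, List.append_assoc]

-- the whole computation on an explicit class list: A's fold equals B's staged passes.
lemma pv_main (enum acs : List Int)
    (hfit : ∀ i ∈ enum.take acs.length, i < 2 ^ acs.length) :
    ((acs.zip enum).foldl (fun d p => enumOntWhileA acs (PySem.Int.toStr p.1) 0 p.2 d)
        (acs.foldl (fun d aClass => d.insert (PySem.Int.toStr aClass) ([] : List String))
          PySem.Dict.empty)).items
      = ((((acs.map PySem.Int.toStr).zip enum).zip
          ((PySem.List.pyRange 0 ((PySem.List.maxD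
              (((acs.map PySem.Int.toStr).zip enum).filterMap
                (fun p => if 0 < p.2 then some (PySem.Int.bitLength p.2) else none))
              (fun x => x) 0 : Nat) : Int) 1).foldl (fun es j =>
            (((acs.map PySem.Int.toStr).zip enum).zip es).map (fun pe =>
              if 0 < pe.1.2 ∧ PySem.Int.band (pe.1.2 >>> j.toNat) 1 = 1
              then pe.2 ++ [PySem.List.pyGetD (acs.map PySem.Int.toStr) j ""] else pe.2))
            (((acs.map PySem.Int.toStr).zip enum).map (fun _ => ([] : List String))))).foldl
          (fun d pe => d.modify pe.1.1 [] (fun v => v ++ pe.2))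
          ((acs.map PySem.Int.toStr).foldl (fun d lab => d.insert lab ([] : List String))
            PySem.Dict.empty)).items := by
  set labels := acs.map PySem.Int.toStr with hlab_def
  set rows := labels.zip enum with hrows_def
  have hlablen : labels.length = acs.length := by simp [hlab_def]
  have hfitzip : ∀ p ∈ acs.zip enum, p.2 < 2 ^ acs.length := by
    intro p hp
    obtain ⟨k, hk, hpe⟩ := List.mem_iff_getElem.mp hp
    rw [List.getElem_zip] at hpe
    apply hfit p.2
    have hk' : k < (enum.take acs.length).length := by
      simp only [List.length_take]
      simp only [List.length_zip] at hk
      omega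
    have : (enum.take acs.length)[k] = p.2 := by
      rw [List.getElem_take, ← hpe]
    exact this ▸ List.getElem_mem hk'
  rw [pv_fold_eq acs enum hfitzip]
  have hont0 : acs.foldl (fun d aClass => d.insert (PySem.Int.toStr aClass) ([] : List String))
        PySem.Dict.empty
      = labels.foldl (fun d lab => d.insert lab ([] : List String)) PySem.Dict.empty := by
    rw [hlab_def, List.foldl_map]
  rw [hont0]
  set ont0 : PySem.Dict String (List String) :=
    labels.foldl (fun d lab => d.insert lab ([] : List String)) PySem.Dict.empty with hont0_def
  have hkeys0 : ont0.keys = PySem.Set.ofList labels := by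
    rw [hont0_def, PySem.Dict.keys_foldl_insert labels (fun _ _ => []) PySem.Dict.empty,
      PySem.Dict.keys_empty, PySem.Set.ofList_eq_foldl, PySem.Set.update.eq_1]
  have hgetD0 : ∀ x, ont0.getD x [] = [] := by
    intro x
    exact pv_getD_nil labels PySem.Dict.empty (fun y => PySem.Dict.getD_empty y []) x
  have hrowmem : ∀ p ∈ rows, p.1 ∈ ont0.keys := by
    intro p hp
    rw [hkeys0]
    exact (PySem.Set.mem_ofList labels p.1).mpr (List.of_mem_zip hp).1
  set width : Nat := PySem.List.maxD
    (rows.filterMap (fun p => if 0 < p.2 then some (PySem.Int.bitLength p.2) else none))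
    (fun x => x) 0 with hwidth_def
  -- the edge matrix B builds
  rw [pv_col_edges rows labels (PySem.List.pyRange 0 (width : Int) 1) (fun _ => [])]
  set fwide : String × Int → List String := fun p => ([] : List String) ++
    (PySem.List.pyRange 0 (width : Int) 1).flatMap (fun j =>
      if 0 < p.2 ∧ PySem.Int.band (p.2 >>> j.toNat) 1 = 1
      then [PySem.List.pyGetD labels j ""] else []) with hfwide_def
  set dictA := rows.foldl (fun d p =>
      if 0 < p.2 then
        d.modify p.1 [] (fun v => v ++
          (PySem.List.pyRange 0 (PySem.Int.bitLength p.2 : Int) 1).filterMap (fun j =>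
            if PySem.Int.band (p.2 >>> j.toNat) 1 = 1
            then some (PySem.List.pyGetD labels j "") else none))
      else d) ont0 with hdictA_def
  set dictB := (rows.zip (rows.map fwide)).foldl
      (fun d pe => d.modify pe.1.1 [] (fun v => v ++ pe.2)) ont0 with hdictB_def
  have hkeysA : dictA.keys = ont0.keys := by
    rw [hdictA_def, pv_keys_condfold (fun p : String × Int => 0 < p.2) _ rows ont0 hrowmem]
  have hkeysB : dictB.keys = ont0.keys := by
    rw [hdictB_def, PySem.Dict.keys_foldl_modify_key (rows.zip (rows.map fwide))
      (fun pe => pe.1.1) [] (fun _ pe => fun v => v ++ pe.2) ont0]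
    apply pv_update_of_subset
    intro x hx
    obtain ⟨pe, hpe, hpex⟩ := List.mem_map.mp hx
    exact hpex ▸ hrowmem pe.1 (List.of_mem_zip hpe).1
  -- per-key agreement
  have hkey : ∀ x, dictA.getD x [] = dictB.getD x [] := by
    intro x
    -- A's value at x
    rw [hdictA_def, pv_getD_condfold (fun p : String × Int => 0 < p.2) _ rows ont0 x,
      hgetD0 x,
      pv_filter_fuse (fun p : String × Int => p.1 = x) (fun p : String × Int => 0 < p.2) _ rows]
    -- B's value at x
    rw [hdictB_def, pv_getD_extfold (fun pe : (String × Int) × List String => pe.1.1)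
      (fun pe => pe.2) (rows.zip (rows.map fwide)) ont0 x, hgetD0 x,
      pv_zip_map_self rows fwide, List.filter_map, List.flatMap_map]
    simp only [List.nil_append, Function.comp_def]
    apply List.flatMap_congr
    intro p hpf
    have hp : p ∈ rows := List.mem_of_mem_filter hpf
    -- show (if 0 < p.2 then A's per-row bits else []) = fwide p
    rw [hfwide_def]
    simp only [List.nil_append]
    rw [PySem.List.pyRange_zero_natCast (n := width), List.flatMap_map]
    by_cases h0 : 0 < p.2
    · have hble : PySem.Int.bitLength p.2 ≤ width := by
        apply PySem.List.le_maxD_id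
        exact List.mem_filterMap.mpr ⟨p, hp, by rw [if_pos h0]⟩
      rw [if_pos h0, PySem.List.pyRange_zero_natCast, List.filterMap_map]
      simp only [Function.comp_def]
      rw [pv_filterMap_flatMap
        (fun j : Nat => PySem.Int.band (p.2 >>> ((((j : Int)).toNat : Nat) : Int)) 1 = 1)
        (fun j : Nat => PySem.List.pyGetD labels (j : Int) "") (List.range _)]
      simp only [Int.toNat_natCast, pv_shiftInt, h0, true_and]
      rw [show width = PySem.Int.bitLength p.2 + (width - PySem.Int.bitLength p.2) from
        (Nat.add_sub_cancel' hble).symm, List.range_add, List.flatMap_append]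
      have hhi : (List.map (fun t => PySem.Int.bitLength p.2 + t)
            (List.range (width - PySem.Int.bitLength p.2))).flatMap (fun j : Nat =>
          if PySem.Int.band (p.2 >>> j) 1 = 1
          then [PySem.List.pyGetD labels (j : Int) ""] else []) = [] := by
        rw [List.flatMap_map]
        apply List.flatMap_eq_nil_iff.mpr
        intro t _
        rw [pv_shift_high h0 (by omega)]
        norm_num [show PySem.Int.band 0 1 = 0 from rfl]
      rw [hhi, List.append_nil]
    · rw [if_neg h0]
      simp [h0]
  -- items agree
  have hnd0 : ont0.keys.Nodup := by rw [hkeys0]; exact PySem.Set.nodup_ofList labels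
  rw [PySem.Dict.items_eq_map_keys dictA (hkeysA.symm ▸ hnd0) [],
    PySem.Dict.items_eq_map_keys dictB (hkeysB.symm ▸ hnd0) [], hkeysA, hkeysB]
  exact List.map_congr_left (fun x _ => by rw [hkey x])

-- ===== VERDICT (by name: the statement is the Claim_ definition above) =====
theorem enumOnt_spec : Claim_equal_enumOnt := by
  intro enum absClasses _ hpre
  unfold Pre_enumOnt at hpre
  unfold Spec_enumOnt enumOnt enumOnt_alt
  cases absClasses with
  | none =>
    exact pv_main enum (PySem.List.pyRange 0 (enum.length : Int) 1) hpre
  | some l =>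
    simp only [PySem.List.slice_to_natCast]
    exact pv_main enum (l.take enum.length) hpre
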